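-- pv_equiv track=rewrite | github.com/wulfebw/algorithms | scripts/search/radio_transmitters.py | another_greedy_solution
-- ===== SOURCE A (Python) =====
-- def incorrect_solution(x,k):
--     if len(x) == 0: return 0
--     if len(x) == 1: return 1
--
--     to_cover = x[0]
--     count = 0
--     for i in range(1, len(x)):
--         if x[i] - k > to_cover:
--             count += 1
--             to_cover = x[i-1] + k
--     if to_cover < x[-1]:
--         count += 1
--     return count
--
-- def find_component_edges(x,k):
--     edges = []
--     s = 0
--     for i in range(1, len(x)):
--         if x[i] - x[i-1] > k:
--             edges.append((s,i-1))
--             s = i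
--     edges.append((s, len(x)-1))
--     return edges
--
-- def compute_component_min_edges(x,k,s,e):
--     return incorrect_solution(x[s:e+1],k)
--
-- def another_greedy_solution(x,k):
--     x = list(set(x))
--     x.sort()
--     count = 0
--     component_edges = find_component_edges(x,k)
--     for (s,e) in component_edges:
--         count += compute_component_min_edges(x,k,s,e)
--     return count
-- ===== SOURCE B (Python) =====
-- def another_greedy_solution(x, k):
--     # One fused linear pass over sorted(set(x)): tracks the current component's
--     # size and greedy state directly, instead of building an edges list and
--     # re-running a sub-greedy on each slice.
--     xs = sorted(set(x))
--     if not xs: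
--         return 0
--     total = 0
--     comp_size = 1       # elements in the current component so far
--     to_cover = xs[0]    # greedy state within the current component
--     local = 0           # transmitters already placed within the current component
--     prev = xs[0]
--     for cur in xs[1:]:
--         if cur - prev > k:
--             # close the current component
--             total += 1 if comp_size == 1 else local + (1 if to_cover < prev else 0)
--             comp_size, to_cover, local = 1, cur, 0
--         else:
--             comp_size += 1
--             if cur - k > to_cover:
--                 local += 1
--                 to_cover = prev + k
--         prev = cur
--     total += 1 if comp_size == 1 else local + (1 if to_cover < prev else 0)
--     return total
-- ===== Notes on version B (the rewrite author's own statement) =====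
-- stated objective: simpler
-- what changed: Replaces A's three-phase pipeline (build an edges list of component index ranges over sorted(set(x)), then re-run the sub-greedy incorrect_solution on each slice) with one fused linear pass that maintains the current component's size, greedy to_cover state and local count inline and closes components on the fly.
import Mathlib
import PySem

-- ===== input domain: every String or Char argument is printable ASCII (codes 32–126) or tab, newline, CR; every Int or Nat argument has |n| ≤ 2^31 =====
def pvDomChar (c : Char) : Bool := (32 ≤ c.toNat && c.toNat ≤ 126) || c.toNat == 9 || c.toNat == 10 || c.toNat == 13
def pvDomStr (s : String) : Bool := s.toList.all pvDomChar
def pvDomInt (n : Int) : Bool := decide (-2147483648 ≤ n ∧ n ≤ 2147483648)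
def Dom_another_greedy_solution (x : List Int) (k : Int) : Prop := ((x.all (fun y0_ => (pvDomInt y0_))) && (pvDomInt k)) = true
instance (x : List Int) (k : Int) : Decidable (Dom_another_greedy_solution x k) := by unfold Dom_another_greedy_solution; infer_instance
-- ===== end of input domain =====

-- B replaces A's edges-list plus per-slice sub-greedy with one fused linear pass over sorted(set(x)) (objective: simpler; same return value everywhere).

-- ===== PORT A =====
def pyIncorrectSolution (x : List Int) (k : Int) : Int :=
  if x.length = 0 then 0
  else if x.length = 1 then 1
  else
    let st := (PySem.List.pyRange 1 (x.length : Int) 1).foldl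
      (fun (st : Int × Int) i =>
        if PySem.List.pyGetD x i 0 - k > st.2 then (st.1 + 1, PySem.List.pyGetD x (i - 1) 0 + k)
        else st) (0, PySem.List.pyGetD x 0 0)
    if st.2 < PySem.List.pyGetD x (-1) 0 then st.1 + 1 else st.1

def pyFindComponentEdges (x : List Int) (k : Int) : List (Int × Int) :=
  let st := (PySem.List.pyRange 1 (x.length : Int) 1).foldl
    (fun (st : List (Int × Int) × Int) i =>
      if PySem.List.pyGetD x i 0 - PySem.List.pyGetD x (i - 1) 0 > k then (st.1 ++ [(st.2, i - 1)], i)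
      else st) ([], 0)
  st.1 ++ [(st.2, (x.length : Int) - 1)]

def pyComputeComponentMinEdges (x : List Int) (k s e : Int) : Int :=
  pyIncorrectSolution (PySem.List.slice x (some s) (some (e + 1))) k

def another_greedy_solution (x : List Int) (k : Int) : Int :=
  let xs := PySem.List.sorted (PySem.Set.ofList x) (fun v => v) false
  (pyFindComponentEdges xs k).foldl
    (fun count p => count + pyComputeComponentMinEdges xs k p.1 p.2) 0

-- ===== PORT B =====
def altClose (cs tc loc prev : Int) : Int :=
  if cs = 1 then 1 else loc + (if tc < prev then 1 else 0)

-- state: (total, comp_size, to_cover, local, prev)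
def altStep (k : Int) (st : Int × Int × Int × Int × Int) (cur : Int) : Int × Int × Int × Int × Int :=
  let (total, cs, tc, loc, prev) := st
  if cur - prev > k then
    (total + altClose cs tc loc prev, 1, cur, 0, cur)
  else if cur - k > tc then
    (total, cs + 1, prev + k, loc + 1, cur)
  else
    (total, cs + 1, tc, loc, cur)

def another_greedy_solution_alt (x : List Int) (k : Int) : Int :=
  let xs := PySem.List.sorted (PySem.Set.ofList x) (fun v => v) false
  match xs with
  | [] => 0
  | a :: t =>
    let st := t.foldl (altStep k) (0, 1, a, 0, a)
    st.1 + altClose st.2.1 st.2.2.1 st.2.2.2.1 st.2.2.2.2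

-- ===== PRECONDITION & SPEC =====
def Spec_another_greedy_solution (x : List Int) (k : Int) (out : Int) : Prop := out = another_greedy_solution_alt x k
instance (x : List Int) (k : Int) (out : Int) : Decidable (Spec_another_greedy_solution x k out) := by unfold Spec_another_greedy_solution; infer_instance

-- ===== CLAIM (what is proved, stated in full; the proofs are below) =====
def Claim_equal_another_greedy_solution : Prop := ∀ (x : List Int) (k : Int), Dom_another_greedy_solution x k → Spec_another_greedy_solution x k (another_greedy_solution x k)

-- ===== LEMMAS AND PROOFS =====

-- Structural (proof-side) recursion mirroring A's incorrect_solution inner loop; prev is the previous element.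
def incGo (k : Int) : Int × Int → Int → List Int → Int × Int
  | st, _, [] => st
  | st, prev, cur :: t =>
      incGo k (if cur - k > st.2 then (st.1 + 1, prev + k) else st) cur t

def incList (x : List Int) (k : Int) : Int :=
  match x with
  | [] => 0
  | [_] => 1
  | a :: b :: t =>
      let st := incGo k (0, a) a (b :: t)
      st.1 + (if st.2 < (b :: t).getLastD 0 then 1 else 0)

lemma incGo_inv (zs : List Int) (k : Int) :
    ∀ (m i : Nat) (st : Int × Int), m = zs.length - i → 1 ≤ i → i ≤ zs.length →
    (PySem.List.pyRange (i : Int) (zs.length : Int) 1).foldl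
      (fun (st : Int × Int) j =>
        if PySem.List.pyGetD zs j 0 - k > st.2 then (st.1 + 1, PySem.List.pyGetD zs (j - 1) 0 + k)
        else st) st
    = incGo k st (zs.getD (i - 1) 0) (zs.drop i) := by
  intro m
  induction m with
  | zero =>
    intro i st hm h1 hn
    have hi : i = zs.length := by omega
    subst hi
    rw [PySem.List.pyRange_one_eq_nil (by omega)]
    simp [incGo, List.drop_length]
  | succ m ih =>
    intro i st hm h1 hn
    have hlt : i < zs.length := by omega
    rw [PySem.List.pyRange_one_cons (by omega : (i : Int) < (zs.length : Int))]
    rw [List.foldl_cons]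
    have hc1 : ((i : Int)) - 1 = ((i - 1 : Nat) : Int) := by omega
    have hc2 : ((i : Int)) + 1 = ((i + 1 : Nat) : Int) := by omega
    have hgi : zs.getD i 0 = zs[i] := by
      simp [List.getD_eq_getElem?_getD, List.getElem?_eq_getElem hlt]
    rw [List.drop_eq_getElem_cons hlt]
    simp only [incGo]
    rw [hc1, PySem.List.pyGetD_natCast, PySem.List.pyGetD_natCast, hc2]
    rw [hgi]
    have := ih (i + 1) (if zs[i] - k > st.2 then (st.1 + 1, zs.getD (i - 1) 0 + k) else st)
      (by omega) (by omega) (by omega)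
    simpa [hgi, List.getElem?_eq_getElem hlt] using this

lemma inc_bridge (zs : List Int) (k : Int) : pyIncorrectSolution zs k = incList zs k := by
  match zs with
  | [] => rfl
  | [a] => rfl
  | a :: b :: t =>
    have h0 : ¬ ((a :: b :: t).length = 0) := by simp
    have h1 : ¬ ((a :: b :: t).length = 1) := by simp
    simp only [pyIncorrectSolution, incList, if_neg h0, if_neg h1]
    have hinv := incGo_inv (a :: b :: t) k ((a :: b :: t).length - 1) 1
      (0, PySem.List.pyGetD (a :: b :: t) 0 0) (by omega) (by omega) (by omega)
    have h1c : ((1 : Nat) : Int) = 1 := rfl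
    rw [h1c] at hinv
    rw [hinv]
    have hlast : PySem.List.pyGetD (a :: b :: t) (-1) 0 = (b :: t).getLastD 0 := by
      rw [PySem.List.pyGetD_neg_one (a :: b :: t) 0 (by simp)]
      simp only [List.getLast_eq_getLastD]
      obtain ⟨v, hv⟩ := Option.isSome_iff_exists.mp (List.getLast?_isSome.mpr (by simp : (b :: t) ≠ []))
      simp [List.getLastD_eq_getLast?, hv]
    rw [hlast]
    simp only [PySem.List.pyGetD_zero_cons]
    simp [incGo]
    split <;> omega

def goA (k : Int) (acc : Int) (c : List Int) : List Int → Int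
  | [] => acc + incList c k
  | cur :: t =>
      if cur - c.getLastD 0 > k then goA k (acc + incList c k) [cur] t
      else goA k acc (c ++ [cur]) t

lemma edgefold_acc (ys : List Int) (k : Int) :
    ∀ (L : List Int) (es : List (Int × Int)) (s : Int),
    L.foldl (fun (st : List (Int × Int) × Int) i =>
        if PySem.List.pyGetD ys i 0 - PySem.List.pyGetD ys (i - 1) 0 > k then (st.1 ++ [(st.2, i - 1)], i)
        else st) (es, s)
    = (es ++ (L.foldl (fun (st : List (Int × Int) × Int) i =>
        if PySem.List.pyGetD ys i 0 - PySem.List.pyGetD ys (i - 1) 0 > k then (st.1 ++ [(st.2, i - 1)], i)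
        else st) ([], s)).1,
       (L.foldl (fun (st : List (Int × Int) × Int) i =>
        if PySem.List.pyGetD ys i 0 - PySem.List.pyGetD ys (i - 1) 0 > k then (st.1 ++ [(st.2, i - 1)], i)
        else st) ([], s)).2) := by
  intro L
  induction L with
  | nil => simp
  | cons j L ih =>
    intro es s
    simp only [List.foldl_cons]
    by_cases h : PySem.List.pyGetD ys j 0 - PySem.List.pyGetD ys (j - 1) 0 > k
    · rw [if_pos h, if_pos h]
      rw [ih (es ++ [(s, j - 1)]) j]
      simp only [List.nil_append]
      rw [ih [(s, j - 1)] j]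
      simp
    · rw [if_neg h, if_neg h]
      exact ih es s

lemma Amain (ys : List Int) (k : Int) :
    ∀ (m i s : Nat) (acc : Int) (c : List Int), m = ys.length - i → 1 ≤ i → i ≤ ys.length → s < i →
    c = (ys.drop s).take (i - s) →
    (let st := (PySem.List.pyRange (i : Int) (ys.length : Int) 1).foldl
        (fun (st : List (Int × Int) × Int) j =>
          if PySem.List.pyGetD ys j 0 - PySem.List.pyGetD ys (j - 1) 0 > k then (st.1 ++ [(st.2, j - 1)], j)
          else st) ([], (s : Int));
      (st.1 ++ [(st.2, (ys.length : Int) - 1)]).foldl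
        (fun cnt p => cnt + pyComputeComponentMinEdges ys k p.1 p.2) acc)
    = goA k acc c (ys.drop i) := by
  intro m
  induction m with
  | zero =>
    intro i s acc c hm h1 hn hs hc
    have hi : i = ys.length := by omega
    subst hi
    rw [PySem.List.pyRange_one_eq_nil (by omega)]
    simp only [List.foldl_nil, List.nil_append, List.foldl_cons, List.drop_length, goA]
    congr 1
    unfold pyComputeComponentMinEdges
    rw [inc_bridge]
    congr 1
    rw [show ((ys.length : Int) - 1) + 1 = ((ys.length : Nat) : Int) by omega]
    rw [PySem.List.slice_natCast]
    exact hc.symm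
  | succ m ih =>
    intro i s acc c hm h1 hn hs hc
    have hlt : i < ys.length := by omega
    have hlt1 : i - 1 < ys.length := by omega
    have hc1 : ((i : Int)) - 1 = ((i - 1 : Nat) : Int) := by omega
    have hg1 : PySem.List.pyGetD ys (i : Int) 0 = ys[i] := by
      rw [PySem.List.pyGetD_natCast]
      simp [List.getD_eq_getElem?_getD, List.getElem?_eq_getElem hlt]
    have hg2 : PySem.List.pyGetD ys ((i : Int) - 1) 0 = ys[i - 1] := by
      rw [hc1, PySem.List.pyGetD_natCast]
      simp [List.getD_eq_getElem?_getD, List.getElem?_eq_getElem hlt1]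
    have hclen : c.length = i - s := by
      rw [hc]; simp [List.length_take, List.length_drop]; omega
    have hcne : c ≠ [] := by
      intro h; rw [h] at hclen; simp at hclen; omega
    have hlastc : c.getLastD 0 = ys[i - 1] := by
      rw [List.getLastD_eq_getLast?, List.getLast?_eq_getElem?, hc]
      rw [List.length_take, List.length_drop, Nat.min_eq_left (by omega)]
      rw [List.getElem?_take_of_lt (by omega), List.getElem?_drop]
      rw [show s + (i - s - 1) = i - 1 by omega]
      simp [List.getElem?_eq_getElem hlt1]
    have hdropi : ys.drop i = ys[i] :: ys.drop (i + 1) := List.drop_eq_getElem_cons hlt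
    have hsing : (ys.drop i).take 1 = [ys[i]] := by
      rw [List.take_add_one]
      simp [List.getElem?_drop, List.getElem?_eq_getElem hlt]
    have happ : c ++ [ys[i]] = (ys.drop s).take (i + 1 - s) := by
      rw [show i + 1 - s = (i - s) + 1 by omega, List.take_add_one, ← hc]
      have : (ys.drop s)[i - s]? = some ys[i] := by
        rw [List.getElem?_drop, show s + (i - s) = i by omega]
        exact List.getElem?_eq_getElem hlt
      rw [this]
      simp
    rw [PySem.List.pyRange_one_cons (by omega : (i : Int) < (ys.length : Int))]
    simp only [List.foldl_cons]
    rw [hdropi]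
    simp only [goA]
    rw [hg1, hg2, hlastc]
    by_cases hgap : ys[i] - ys[i - 1] > k
    · rw [if_pos hgap, if_pos hgap]
      simp only [List.nil_append]
      rw [edgefold_acc ys k _ [((s : Int), (i : Int) - 1)] (i : Int)]
      simp only [List.cons_append, List.nil_append, List.foldl_cons]
      have hcomp : pyComputeComponentMinEdges ys k (s : Int) ((i : Int) - 1) = incList c k := by
        unfold pyComputeComponentMinEdges
        rw [inc_bridge]
        congr 1
        rw [show ((i : Int) - 1) + 1 = ((i : Nat) : Int) by omega]
        rw [PySem.List.slice_natCast]
        exact hc.symm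
      rw [hcomp]
      have := ih (i + 1) i (acc + incList c k) [ys[i]] (by omega) (by omega) (by omega) (by omega)
        (by rw [show i + 1 - i = 1 by omega]; exact hsing.symm)
      rw [show ((i + 1 : Nat) : Int) = (i : Int) + 1 by omega] at this
      exact this
    · rw [if_neg hgap, if_neg hgap]
      have := ih (i + 1) s acc (c ++ [ys[i]]) (by omega) (by omega) (by omega) (by omega) happ
      rw [show ((i + 1 : Nat) : Int) = (i : Int) + 1 by omega] at this
      exact this

def incSt (k : Int) (c : List Int) : Int × Int :=
  match c with
  | [] => (0, 0)
  | a :: r => incGo k (0, a) a r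

lemma close_eq_incList (k : Int) (c : List Int) (hc : c ≠ []) :
    altClose (c.length : Int) (incSt k c).2 (incSt k c).1 (c.getLastD 0) = incList c k := by
  match c with
  | [a] => simp [altClose, incList]
  | a :: b :: t =>
    have hne : ¬ (((a :: b :: t).length : Int) = 1) := by simp; omega
    simp only [altClose, if_neg hne, incSt, incList]
    have hl : (a :: b :: t).getLastD 0 = (b :: t).getLastD 0 := by
      rw [List.getLastD_eq_getLast?, List.getLastD_eq_getLast?,
        List.getLast?_eq_some_getLast (by simp : (a :: b :: t) ≠ []),
        List.getLast?_eq_some_getLast (by simp : (b :: t) ≠ [])]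
      simp [List.getLast_cons]
    rw [hl]
    rfl

lemma incGo_append (k : Int) :
    ∀ (r : List Int) (st : Int × Int) (a cur : Int),
    incGo k st a (r ++ [cur])
    = (if cur - k > (incGo k st a r).2
        then ((incGo k st a r).1 + 1, (a :: r).getLastD 0 + k)
        else incGo k st a r) := by
  intro r
  induction r with
  | nil => intro st a cur; simp [incGo]
  | cons x r ih =>
    intro st a cur
    simp only [List.cons_append, incGo]
    rw [ih]
    rfl

lemma Bmain (k : Int) :
    ∀ (t : List Int) (acc : Int) (c : List Int), c ≠ [] →
    (let st := t.foldl (altStep k) (acc, (c.length : Int), (incSt k c).2, (incSt k c).1, c.getLastD 0);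
     st.1 + altClose st.2.1 st.2.2.1 st.2.2.2.1 st.2.2.2.2)
    = goA k acc c t := by
  intro t
  induction t with
  | nil =>
    intro acc c hc
    simp only [List.foldl_nil, goA]
    exact congrArg (acc + ·) (close_eq_incList k c hc)
  | cons cur t ih =>
    intro acc c hc
    simp only [List.foldl_cons, goA, altStep]
    by_cases hgap : cur - c.getLastD 0 > k
    · rw [if_pos hgap, if_pos hgap]
      rw [close_eq_incList k c hc]
      have h1 := ih (acc + incList c k) [cur] (by simp)
      simpa [incSt, incGo] using h1
    · rw [if_neg hgap, if_neg hgap]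
      obtain ⟨a, r, rfl⟩ : ∃ a r, c = a :: r := by
        cases c with | nil => exact absurd rfl hc | cons a r => exact ⟨a, r, rfl⟩
      have hlen : ((a :: r).length : Int) + 1 = (((a :: r) ++ [cur]).length : Int) := by
        simp
      have hinc : incSt k ((a :: r) ++ [cur])
          = (if cur - k > (incSt k (a :: r)).2
              then ((incSt k (a :: r)).1 + 1, (a :: r).getLastD 0 + k)
              else incSt k (a :: r)) := by
        simp only [incSt, List.cons_append]
        rw [incGo_append]
      have hlastapp : ((a :: r) ++ [cur]).getLastD 0 = cur := by
        rw [List.getLastD_eq_getLast?, List.getLast?_concat]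
        rfl
      have := ih acc ((a :: r) ++ [cur]) (by simp)
      rw [hinc, hlastapp, ← hlen] at this
      by_cases hcov : cur - k > (incSt k (a :: r)).2
      · rw [if_pos hcov] at this ⊢
        simpa using this
      · rw [if_neg hcov] at this ⊢
        simpa using this

-- ===== VERDICT (by name: the statement is the Claim_ definition above) =====
theorem another_greedy_solution_spec : Claim_equal_another_greedy_solution := by
  intro x k _
  unfold Spec_another_greedy_solution
  simp only [another_greedy_solution, another_greedy_solution_alt]
  cases hxs : PySem.List.sorted (PySem.Set.ofList x) (fun v => v) false with
  | nil =>
    simp only [pyFindComponentEdges, pyComputeComponentMinEdges, pyIncorrectSolution]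
    rfl
  | cons a t =>
    have hA := Amain (a :: t) k ((a :: t).length - 1) 1 0 0 [a] (by omega) (by omega)
      (by simp) (by omega) (by simp)
    rw [show (((1 : Nat)) : Int) = 1 from rfl, show (((0 : Nat)) : Int) = 0 from rfl] at hA
    have hB := Bmain k t 0 [a] (by simp)
    simp only [incSt, incGo, List.length_cons, List.length_nil] at hB
    simp only [pyFindComponentEdges]
    rw [show List.drop 1 (a :: t) = t from rfl] at hA
    rw [hA, ← hB]
    rfl
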